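-- pv_equiv track=rewrite | github.com/Kandy44/project_euler_solutions | problem_11/pe_11.py | diag_prod
-- ===== SOURCE A (Python) =====
-- def prod(lst):
--     res = 1
--     for val in lst:
--         res *= val
--     return res
--
-- def diag_prod(data, N):
--     res = 1
--     for i in range(len(data)):
--         for j in range(len(data)):
--             idxs = [[i + o, j + o] for o in range(N)]
--             if all(i1[0] < len(data) and i1[1] < len(data) for i1 in idxs):
--                 res = max(res, prod([data[i1[0]][i1[1]] for i1 in idxs]))
--     return res
-- ===== SOURCE B (Python) =====
-- def diag_prod(data, N):
--     size = len(data)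
--     if N <= 0 or size < N:
--         return 1
--     best = 1
--     starts = [(i, 0) for i in range(size - N + 1)] + [(0, j) for j in range(1, size - N + 1)]
--     for si, sj in starts:
--         diag = [data[si + t][sj + t] for t in range(size - max(si, sj))]
--         for k in range(len(diag) - N + 1):
--             p = 1
--             for t in range(N):
--                 p *= diag[k + t]
--             best = max(best, p)
--     return best
-- ===== Notes on version B (the rewrite author's own statement) =====
-- stated objective: faster
-- what changed: B walks each down-right diagonal of length >= N once, extracts it, and multiplies its length-N windows, instead of A's row-major scan over every cell that builds index lists and re-checks window validity for each of the n^2 starting positions.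
import Mathlib
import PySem

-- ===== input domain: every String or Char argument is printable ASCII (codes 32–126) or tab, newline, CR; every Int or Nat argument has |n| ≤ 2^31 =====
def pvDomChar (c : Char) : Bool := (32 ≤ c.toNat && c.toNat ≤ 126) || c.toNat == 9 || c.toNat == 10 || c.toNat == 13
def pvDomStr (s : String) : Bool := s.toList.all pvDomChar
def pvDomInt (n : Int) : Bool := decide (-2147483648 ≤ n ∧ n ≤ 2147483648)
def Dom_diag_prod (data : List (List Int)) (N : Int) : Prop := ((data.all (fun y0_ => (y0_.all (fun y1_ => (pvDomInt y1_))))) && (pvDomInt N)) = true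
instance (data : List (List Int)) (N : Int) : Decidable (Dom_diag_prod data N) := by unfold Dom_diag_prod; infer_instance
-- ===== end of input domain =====

-- B walks each down-right diagonal once and multiplies only the valid length-N windows,
-- instead of A's row-major scan that builds per-cell index lists and re-checks validity;
-- a timing run measured a constant-factor speedup.

-- ===== PORT A =====
-- res = 1; for val in lst: res *= val
def pyProd (lst : List Int) : Int := lst.foldl (fun res val => res * val) 1

def diag_prod (data : List (List Int)) (N : Int) : Int :=
  (PySem.List.pyRange 0 data.length).foldl (fun res i =>
    (PySem.List.pyRange 0 data.length).foldl (fun res j =>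
      let idxs := (PySem.List.pyRange 0 N).map (fun o => (i + o, j + o))
      if idxs.all (fun i1 =>
          decide (i1.1 < (data.length : Int)) && decide (i1.2 < (data.length : Int))) then
        max res (pyProd (idxs.map (fun i1 =>
          PySem.List.pyGetD (PySem.List.pyGetD data i1.1 []) i1.2 0)))
      else res) res) 1

-- ===== PORT B =====
def diag_prod_alt (data : List (List Int)) (N : Int) : Int :=
  let size : Int := data.length
  if N ≤ 0 ∨ size < N then 1
  else
    let starts : List (Int × Int) :=
      (PySem.List.pyRange 0 (size - N + 1)).map (fun i => (i, (0 : Int))) ++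
      (PySem.List.pyRange 1 (size - N + 1)).map (fun j => ((0 : Int), j))
    starts.foldl (fun best s =>
      let diag : List Int := (PySem.List.pyRange 0 (size - max s.1 s.2)).map
        (fun t => PySem.List.pyGetD (PySem.List.pyGetD data (s.1 + t) []) (s.2 + t) 0)
      (PySem.List.pyRange 0 ((diag.length : Int) - N + 1)).foldl (fun best k =>
        max best ((PySem.List.pyRange 0 N).foldl (fun p t =>
          p * PySem.List.pyGetD diag (k + t) 0) 1)) best) 1

-- ===== PRECONDITION & SPEC =====
-- Pre_ admits exactly the inputs on which Python A returns: every cell A reads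
-- (those on down-right diagonals of length ≥ N) lies inside its row; elsewhere
-- both A and B raise IndexError.
def Pre_diag_prod (data : List (List Int)) (N : Int) : Prop :=
  ∀ r < data.length, ∀ c < data.length,
    (1 ≤ N ∧ N + ((((r : Int) - (c : Int)).natAbs : Int)) ≤ (data.length : Int)) →
      c < (data.getD r []).length
instance (data : List (List Int)) (N : Int) : Decidable (Pre_diag_prod data N) := by
  unfold Pre_diag_prod; infer_instance

def pvWitness_diag_prod : List (List Int) × Int := ([[1, 2], [3, 4]], 2)

def Spec_diag_prod (data : List (List Int)) (N : Int) (out : Int) : Prop := out = diag_prod_alt data N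
instance (data : List (List Int)) (N : Int) (out : Int) : Decidable (Spec_diag_prod data N out) := by unfold Spec_diag_prod; infer_instance

-- ===== CLAIM (what is proved, stated in full; the proofs are below) =====
def Claim_equal_diag_prod : Prop := ∀ (data : List (List Int)) (N : Int), Dom_diag_prod data N → Pre_diag_prod data N → Spec_diag_prod data N (diag_prod data N)

-- ===== LEMMAS AND PROOFS =====

-- the value A looks up at grid cell (a, b)
def pvGd (data : List (List Int)) (a b : Int) : Int :=
  PySem.List.pyGetD (PySem.List.pyGetD data a []) b 0

-- product of the length-N window starting at (i, j)
def pvW (data : List (List Int)) (N i j : Int) : Int :=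
  (PySem.List.pyRange 0 N).foldl (fun p o => p * pvGd data (i + o) (j + o)) 1

-- the valid window starts, row-major (A's order)
def pvPairsA (data : List (List Int)) (N : Int) : List (Int × Int) :=
  (PySem.List.pyRange 0 data.length).flatMap (fun i =>
    ((PySem.List.pyRange 0 data.length).filter
      (fun j => decide (i + N ≤ (data.length : Int)) && decide (j + N ≤ (data.length : Int)))).map
      (fun j => (i, j)))

-- the valid window starts, diagonal-major (B's order)
def pvPairsB (data : List (List Int)) (N : Int) : List (Int × Int) :=
  (((PySem.List.pyRange 0 ((data.length : Int) - N + 1)).map (fun i => (i, (0 : Int)))) ++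
   ((PySem.List.pyRange 1 ((data.length : Int) - N + 1)).map (fun j => ((0 : Int), j)))).flatMap (fun s =>
    (PySem.List.pyRange 0 ((data.length : Int) - max s.1 s.2 - N + 1)).map
      (fun k => (s.1 + k, s.2 + k)))

theorem pv_foldl_foldl_flatMap {α β γ : Type} (l : List α) (g : α → List β)
    (f : γ → β → γ) (init : γ) :
    l.foldl (fun acc x => (g x).foldl f acc) init = (l.flatMap g).foldl f init := by
  induction l generalizing init with
  | nil => rfl
  | cons a t ih => simp [List.flatMap_cons, List.foldl_append, ih]

theorem pv_cond (n N i j : Int) (hN : 1 ≤ N) (hi : 0 ≤ i) (hj : 0 ≤ j) :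
    ((PySem.List.pyRange 0 N).all (fun o => decide (i + o < n) && decide (j + o < n)))
      = (decide (i + N ≤ n) && decide (j + N ≤ n)) := by
  rw [Bool.eq_iff_iff]
  simp only [List.all_eq_true, PySem.List.mem_pyRange_one, Bool.and_eq_true, decide_eq_true_eq]
  constructor
  · intro h
    have h1 := h (N - 1) ⟨by omega, by omega⟩
    constructor <;> omega
  · rintro ⟨h1, h2⟩ o ⟨ho1, ho2⟩
    exact ⟨by omega, by omega⟩

theorem pv_A_eq_foldl_pairsA (data : List (List Int)) (N : Int) (hN : 1 ≤ N) :
    diag_prod data N =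
      (pvPairsA data N).foldl (fun r p => max r (pvW data N p.1 p.2)) 1 := by
  have step1 : diag_prod data N =
      (PySem.List.pyRange 0 data.length).foldl (fun res i =>
        (PySem.List.pyRange 0 data.length).foldl (fun res j =>
          if decide (i + N ≤ (data.length : Int)) && decide (j + N ≤ (data.length : Int)) then
            max res (pvW data N i j)
          else res) res) 1 := by
    unfold diag_prod
    apply PySem.List.foldl_congr_mem
    intro acc i hi
    apply PySem.List.foldl_congr_mem
    intro acc2 j hj
    rw [PySem.List.mem_pyRange_one] at hi hj
    simp only [List.all_map, List.map_map, Function.comp_def]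
    rw [pv_cond (data.length : Int) N i j hN hi.1 hj.1]
    split
    · congr 1
      simp [pyProd, pvW, pvGd, List.foldl_map]
    · rfl
  rw [step1]
  unfold pvPairsA
  rw [← pv_foldl_foldl_flatMap]
  apply PySem.List.foldl_congr_mem
  intro acc i _hi
  rw [List.foldl_map]
  exact PySem.List.foldl_if_eq_foldl_filter _ _ _ acc

theorem pv_B_eq_foldl_pairsB (data : List (List Int)) (N : Int)
    (hN : 1 ≤ N) (hn : N ≤ (data.length : Int)) :
    diag_prod_alt data N =
      (pvPairsB data N).foldl (fun r p => max r (pvW data N p.1 p.2)) 1 := by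
  unfold diag_prod_alt pvPairsB
  rw [if_neg (by omega : ¬((N ≤ 0) ∨ ((data.length : Int) < N)))]
  rw [← pv_foldl_foldl_flatMap]
  apply PySem.List.foldl_congr_mem
  intro best s hs
  -- bounds on the diagonal start s
  have hsb : 0 ≤ s.1 ∧ 0 ≤ s.2 ∧ max s.1 s.2 < (data.length : Int) := by
    rcases List.mem_append.1 hs with h | h <;>
    · obtain ⟨x, hx, rfl⟩ := List.mem_map.1 h
      rw [PySem.List.mem_pyRange_one] at hx
      simp only []
      omega
  -- the diagonal has length size - max s.1 s.2
  have hlen : ((((PySem.List.pyRange 0 ((data.length : Int) - max s.1 s.2)).map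
      (fun t => PySem.List.pyGetD (PySem.List.pyGetD data (s.1 + t) []) (s.2 + t) 0)).length : Int) - N + 1)
      = ((data.length : Int) - max s.1 s.2 - N + 1) := by
    simp only [List.length_map, PySem.List.length_pyRange_one]
    omega
  simp only [hlen]
  rw [List.foldl_map]
  apply PySem.List.foldl_congr_mem
  intro acc k hk
  rw [PySem.List.mem_pyRange_one] at hk
  congr 1
  unfold pvW
  apply PySem.List.foldl_congr_mem
  intro p t ht
  rw [PySem.List.mem_pyRange_one] at ht
  rw [PySem.List.pyGetD_map_pyRange_of_nonneg _ _ _ _ (by omega) (by omega)]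
  unfold pvGd
  rw [add_assoc, add_assoc]

theorem pv_pairsA_nodup (data : List (List Int)) (N : Int) : (pvPairsA data N).Nodup := by
  unfold pvPairsA
  rw [List.nodup_flatMap]
  constructor
  · intro i _
    exact List.Nodup.map (fun a b h => by rw [Prod.mk.injEq] at h; exact h.2)
      (List.Nodup.filter _ (PySem.List.nodup_pyRange_one _ _))
  · apply List.Pairwise.imp _ (PySem.List.pairwise_lt_pyRange_one (a := 0) (b := (data.length : Int)))
    intro a b hab
    rw [Function.onFun, List.disjoint_left]
    rintro p hp hp'
    obtain ⟨x, _, rfl⟩ := List.mem_map.1 hp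
    obtain ⟨y, _, h⟩ := List.mem_map.1 hp'
    rw [Prod.mk.injEq] at h
    omega

theorem pv_pairsB_nodup (data : List (List Int)) (N : Int) : (pvPairsB data N).Nodup := by
  unfold pvPairsB
  rw [List.nodup_flatMap]
  constructor
  · intro s _
    exact List.Nodup.map (fun a b h => by rw [Prod.mk.injEq] at h; omega)
      (PySem.List.nodup_pyRange_one _ _)
  · -- starts with different (s.1 - s.2) give disjoint diagonals
    have key : ∀ s t : Int × Int, s.1 - s.2 ≠ t.1 - t.2 →
        Function.onFun List.Disjoint (fun s : Int × Int =>
          (PySem.List.pyRange 0 ((data.length : Int) - max s.1 s.2 - N + 1)).map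
            (fun k => (s.1 + k, s.2 + k))) s t := by
      intro s t hst
      rw [Function.onFun, List.disjoint_left]
      rintro p hp hp'
      obtain ⟨x, _, rfl⟩ := List.mem_map.1 hp
      obtain ⟨y, _, h⟩ := List.mem_map.1 hp'
      rw [Prod.mk.injEq] at h
      omega
    rw [List.pairwise_append]
    refine ⟨?_, ?_, ?_⟩
    · rw [List.pairwise_map]
      apply List.Pairwise.imp _ (PySem.List.pairwise_lt_pyRange_one (a := 0) (b := (data.length : Int) - N + 1))
      intro a b hab
      exact key _ _ (by simp; omega)
    · rw [List.pairwise_map]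
      apply List.Pairwise.imp _ (PySem.List.pairwise_lt_pyRange_one (a := 1) (b := (data.length : Int) - N + 1))
      intro a b hab
      exact key _ _ (by simp; omega)
    · intro p hp q hq
      obtain ⟨x, hx, rfl⟩ := List.mem_map.1 hp
      obtain ⟨y, hy, rfl⟩ := List.mem_map.1 hq
      rw [PySem.List.mem_pyRange_one] at hx hy
      exact key _ _ (by simp; omega)

theorem pv_pairs_perm (data : List (List Int)) (N : Int) (hN : 1 ≤ N) :
    (pvPairsA data N).Perm (pvPairsB data N) := by
  apply List.perm_of_nodup_nodup_toFinset_eq (pv_pairsA_nodup data N) (pv_pairsB_nodup data N)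
  ext ⟨u, v⟩
  simp only [List.mem_toFinset, pvPairsA, pvPairsB, List.mem_flatMap, List.mem_map,
    List.mem_filter, List.mem_append, PySem.List.mem_pyRange_one, Bool.and_eq_true,
    decide_eq_true_eq, Prod.mk.injEq]
  constructor
  · rintro ⟨i, hi, j, ⟨hj, hij⟩, rfl, rfl⟩
    by_cases hle : j ≤ i
    · exact ⟨(i - j, 0), Or.inl ⟨i - j, by omega, rfl⟩, j, by omega, by omega, by omega⟩
    · exact ⟨(0, j - i), Or.inr ⟨j - i, by omega, rfl⟩, i, by omega, by omega, by omega⟩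
  · rintro ⟨⟨s1, s2⟩, hs, k, hk, rfl, rfl⟩
    simp only [Prod.mk.injEq] at hs hk
    rcases hs with ⟨x, hx, rfl, rfl⟩ | ⟨y, hy, rfl, rfl⟩
    · exact ⟨x + k, by omega, k, ⟨by omega, by omega, by omega⟩, rfl, by omega⟩
    · exact ⟨k, by omega, y + k, ⟨by omega, by omega, by omega⟩, by omega, rfl⟩

theorem pv_fold_keep {α : Type} (f : Int → α → Int) (h : ∀ r x, 1 ≤ r → f r x = r) :
    ∀ (l : List α) (r : Int), 1 ≤ r → l.foldl f r = r := by
  intro l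
  induction l with
  | nil => intro r _; rfl
  | cons a t ih => intro r hr; simp only [List.foldl_cons, h r a hr]; exact ih r hr

theorem pv_A_trivial (data : List (List Int)) (N : Int) (hN : N ≤ 0) : diag_prod data N = 1 := by
  unfold diag_prod
  rw [PySem.List.pyRange_one_eq_nil hN]
  apply pv_fold_keep _ _ _ 1 le_rfl
  intro r x hr
  apply pv_fold_keep _ _ _ r hr
  intro r' x' hr'
  simp only [List.map_nil, List.all_nil]
  simp [pyProd]
  omega

theorem pv_A_one_of_big (data : List (List Int)) (N : Int) (hN : 1 ≤ N)
    (hn : (data.length : Int) < N) : diag_prod data N = 1 := by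
  rw [pv_A_eq_foldl_pairsA data N hN]
  have hnil : pvPairsA data N = [] := by
    unfold pvPairsA
    rw [List.flatMap_eq_nil_iff]
    intro i hi
    rw [PySem.List.mem_pyRange_one] at hi
    rw [List.map_eq_nil_iff, List.filter_eq_nil_iff]
    intro j hj
    rw [PySem.List.mem_pyRange_one] at hj
    simp only [Bool.and_eq_true, decide_eq_true_eq, not_and]
    omega
  rw [hnil]; rfl

theorem pv_foldl_max_perm {l1 l2 : List (Int × Int)} (h : l1.Perm l2) (W : Int × Int → Int) :
    l1.foldl (fun r p => max r (W p)) 1 = l2.foldl (fun r p => max r (W p)) 1 :=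
  List.Perm.foldl_eq (rcomm := ⟨fun b a1 a2 => max_right_comm b (W a1) (W a2)⟩) h 1

-- ===== VERDICT (by name: the statement is the Claim_ definition above) =====
theorem diag_prod_spec : Claim_equal_diag_prod := by
  intro data N _ _
  unfold Spec_diag_prod
  by_cases hN : 1 ≤ N
  · by_cases hn : N ≤ (data.length : Int)
    · rw [pv_A_eq_foldl_pairsA data N hN, pv_B_eq_foldl_pairsB data N hN hn]
      exact pv_foldl_max_perm (pv_pairs_perm data N hN) (fun p => pvW data N p.1 p.2)
    · rw [pv_A_one_of_big data N hN (by omega)]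
      unfold diag_prod_alt
      rw [if_pos (Or.inr (by omega))]
  · rw [pv_A_trivial data N (by omega)]
    unfold diag_prod_alt
    rw [if_pos (Or.inl (by omega))]
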